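-- pv_equiv track=rewrite | github.com/ukleon123/---- | 1802/1802.py | solve
-- ===== SOURCE A (Python) =====
-- def solve(bent):
--     result = 1
--     length = len(bent) // 2
--     for i in range(length):
--         if bent[i] != bent[-(i + 1)]:
--             continue
--         else:
--             return 0
--     if length > 1:
--         result = solve(bent[:length])
--         result = solve(bent[-length:])
--     return result
-- ===== SOURCE B (Python) =====
-- def solve(bent):
--     window = bent
--     while True:
--         length = len(window) // 2
--         for i in range(length):
--             if window[i] == window[-(i + 1)]:
--                 return 0
--         if length > 1:
--             window = window[-length:]
--         else:
--             return 1
-- ===== Notes on version B (the rewrite author's own statement) =====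
-- stated objective: faster
-- what changed: Replaced the recursion by an iterative while loop that keeps only the current window and descends solely into the right half, dropping A's dead left-half recursive call whose result is immediately overwritten.
import Mathlib
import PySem

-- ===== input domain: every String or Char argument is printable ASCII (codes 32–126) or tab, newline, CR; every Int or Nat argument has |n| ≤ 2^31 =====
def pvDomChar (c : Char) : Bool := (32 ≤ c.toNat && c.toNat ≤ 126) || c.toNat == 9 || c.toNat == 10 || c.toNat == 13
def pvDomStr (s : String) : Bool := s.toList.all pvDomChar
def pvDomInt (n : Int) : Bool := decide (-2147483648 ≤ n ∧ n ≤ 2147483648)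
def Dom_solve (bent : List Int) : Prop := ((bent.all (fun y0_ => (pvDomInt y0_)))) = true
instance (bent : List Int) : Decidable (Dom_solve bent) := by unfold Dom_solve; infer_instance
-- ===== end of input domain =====

-- B replaces A's recursion by an iterative loop over the current window, descending only
-- into the right half (A's left-half recursive call is dead: its result is overwritten).
-- Objective: faster (B skips the dead left-half work, O(n) total instead of O(n log n)).

-- ===== PORT A =====
-- the 'for i in range(length)' loop of A: first i with bent[i] == bent[-(i+1)] returns 0
def solveLoop (bent : List Int) : List Nat → Option Int
  | [] => none
  | i :: rest =>
    if PySem.List.pyGet? bent (i : Int) ≠ PySem.List.pyGet? bent (-((i : Int) + 1)) then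
      solveLoop bent rest
    else some 0

def solve (bent : List Int) : Int :=
  let result : Int := 1
  let length := bent.length / 2
  match solveLoop bent (List.range length) with
  | some r => r
  | none =>
    if h : length > 1 then
      let _result := solve (PySem.List.slice bent none (some (length : Int)))
      solve (PySem.List.slice bent (some (-(length : Int))) none)
    else result
termination_by bent.length
decreasing_by
  · rw [PySem.List.slice_to_natCast]; simp; omega
  · rw [PySem.List.slice_from_neg_natCast bent length (by omega)]
    simp; omega

-- ===== PORT B =====
-- the inner for loop of B: does some window[i] equal window[-(i+1)]?
def altCheck (window : List Int) (len2 : Nat) : Bool :=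
  (List.range len2).any (fun i =>
    PySem.List.pyGet? window (i : Int) == PySem.List.pyGet? window (-((i : Int) + 1)))

def solve_alt (window : List Int) : Int :=
  let length := window.length / 2
  if altCheck window length then 0
  else if h : length > 1 then
    solve_alt (PySem.List.slice window (some (-(length : Int))) none)
  else 1
termination_by window.length
decreasing_by
  rw [PySem.List.slice_from_neg_natCast window length (by omega)]
  simp; omega

-- ===== PRECONDITION & SPEC =====
def Spec_solve (bent : List Int) (out : Int) : Prop := out = solve_alt bent
instance (bent : List Int) (out : Int) : Decidable (Spec_solve bent out) := by unfold Spec_solve; infer_instance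

-- ===== CLAIM (what is proved, stated in full; the proofs are below) =====
def Claim_equal_solve : Prop := ∀ (bent : List Int), Dom_solve bent → Spec_solve bent (solve bent)

-- ===== LEMMAS AND PROOFS =====
theorem solveLoop_eq_altCheck (bent : List Int) (l : List Nat) :
    solveLoop bent l = if l.any (fun i =>
      PySem.List.pyGet? bent (i : Int) == PySem.List.pyGet? bent (-((i : Int) + 1))) = true then some 0 else none := by
  induction l with
  | nil => simp only [solveLoop, List.any_nil, if_neg Bool.false_ne_true]
  | cons i rest ih =>
    by_cases h : PySem.List.pyGet? bent (i : Int) = PySem.List.pyGet? bent (-((i : Int) + 1))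
    · have hb : (PySem.List.pyGet? bent (i : Int) == PySem.List.pyGet? bent (-((i : Int) + 1))) = true :=
        beq_iff_eq.mpr h
      simp only [solveLoop, List.any_cons, hb, Bool.true_or, if_neg (not_not_intro h), if_pos trivial]
    · have hb : (PySem.List.pyGet? bent (i : Int) == PySem.List.pyGet? bent (-((i : Int) + 1))) = false :=
        beq_eq_false_iff_ne.mpr h
      simp only [solveLoop, List.any_cons, hb, Bool.false_or, if_pos h, ih]

theorem solveLoop_range (bent : List Int) (n : Nat) :
    solveLoop bent (List.range n) = if altCheck bent n = true then some 0 else none := by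
  rw [solveLoop_eq_altCheck]; rfl

theorem solve_eq_alt : ∀ (n : Nat) (bent : List Int), bent.length = n → solve bent = solve_alt bent := by
  intro n
  induction n using Nat.strong_induction_on with
  | _ n ih =>
    intro bent hlen
    conv_lhs => rw [solve.eq_def]
    conv_rhs => rw [solve_alt.eq_def]
    simp only [solveLoop_range]
    by_cases hc : altCheck bent (bent.length / 2) = true
    · simp [hc]
    · rw [Bool.not_eq_true] at hc
      simp only [hc, Bool.false_eq_true, if_false]
      by_cases h : bent.length / 2 > 1
      · simp only [h, dif_pos]
        apply ih ((PySem.List.slice bent (some (-((bent.length / 2 : Nat) : Int))) none).length)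
        · rw [PySem.List.slice_from_neg_natCast bent (bent.length / 2) (by omega)]
          simp; omega
        · rfl
      · simp [h]

-- ===== VERDICT (by name: the statement is the Claim_ definition above) =====
theorem solve_spec : Claim_equal_solve := by
  intro bent _
  unfold Spec_solve
  exact solve_eq_alt bent.length bent rfl
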